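-- pv_equiv track=rewrite | github.com/alexhgh/WizardParty | utility_ref.py | possible5
-- ===== SOURCE A (Python) =====
-- def possible5(order,constraint):
--
--     collect = []
--     wiz_a = constraint[0]
--     wiz_b = constraint[1]
--     wiz_c = constraint[2]
--
--     index = order.index(wiz_b)
--
--     for i in range(index+1,len(order)+1):
--         order1 = order[:]
--         order1.insert(i,wiz_c)
--
--         collect += [order1]
--     return collect
-- ===== SOURCE B (Python) =====
-- def possible5(order, constraint):
--     wiz_c = constraint[2]
--     index = order.index(constraint[1])
--     pre = order[:index + 1]
--     suf = order[index + 1:]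
--     out = [pre + [wiz_c] + suf]
--     while suf:
--         pre.append(suf.pop(0))
--         out.append(pre + [wiz_c] + suf)
--     return out
-- ===== Notes on version B (the rewrite author's own statement) =====
-- stated objective: alternative
-- what changed: B keeps one running prefix/suffix pair and moves the inserted wizard one step right per iteration, instead of re-copying the whole list and calling insert(i, wiz_c) independently for each position.
import Mathlib
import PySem

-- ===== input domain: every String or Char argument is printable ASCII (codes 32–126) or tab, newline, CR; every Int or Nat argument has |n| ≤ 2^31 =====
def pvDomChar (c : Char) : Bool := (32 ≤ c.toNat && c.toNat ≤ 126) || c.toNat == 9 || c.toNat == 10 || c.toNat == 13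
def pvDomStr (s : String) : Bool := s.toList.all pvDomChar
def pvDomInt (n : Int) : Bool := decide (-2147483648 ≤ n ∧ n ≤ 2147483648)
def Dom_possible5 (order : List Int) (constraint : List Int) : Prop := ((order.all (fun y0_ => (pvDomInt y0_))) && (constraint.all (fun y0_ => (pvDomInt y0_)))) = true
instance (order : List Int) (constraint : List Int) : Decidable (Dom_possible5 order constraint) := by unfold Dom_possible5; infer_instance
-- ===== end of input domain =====

-- B keeps one running prefix/suffix pair, moving the inserted wizard one step right per
-- output, instead of copying the whole list and calling insert(i, wiz_c) for each i.

-- ===== PORT A =====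
-- Reads constraint[0..2] and order.index(wiz_b); where Python would raise
-- (IndexError/ValueError) the option is none and we return [] — excluded by Pre_.
def possible5 (order : List Int) (constraint : List Int) : List (List Int) :=
  match PySem.List.pyGet? constraint 0, PySem.List.pyGet? constraint 1,
        PySem.List.pyGet? constraint 2 with
  | some _wiz_a, some wiz_b, some wiz_c =>
    match PySem.List.index? order wiz_b with
    | some index =>
      (PySem.List.pyRange ((index : Int) + 1) ((order.length : Int) + 1) 1).foldl
        (fun collect i => collect ++ [PySem.List.insert order i wiz_c]) []
    | none => []
  | _, _, _ => []

-- ===== PORT B =====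
-- the while loop of Source B: pre grows by the head of suf, one output per step
def wizAltLoop (wiz_c : Int) (pre : List Int) : List Int → List (List Int)
  | [] => []
  | x :: suf => (pre ++ [x] ++ [wiz_c] ++ suf) :: wizAltLoop wiz_c (pre ++ [x]) suf

def possible5_alt (order : List Int) (constraint : List Int) : List (List Int) :=
  (PySem.List.pyGet? constraint 2).elim [] (fun wiz_c =>
    (PySem.List.pyGet? constraint 1).elim [] (fun wiz_b =>
      (PySem.List.index? order wiz_b).elim [] (fun index =>
        let pre := PySem.List.slice order none (some ((index : Int) + 1))
        let suf := PySem.List.slice order (some ((index : Int) + 1)) none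
        (pre ++ [wiz_c] ++ suf) :: wizAltLoop wiz_c pre suf)))

-- ===== PRECONDITION & SPEC =====
-- Pre_ excludes exactly the inputs where A raises: constraint shorter than 3
-- (IndexError) or constraint[1] not in order (ValueError).
def Pre_possible5 (order : List Int) (constraint : List Int) : Prop :=
  3 ≤ constraint.length ∧ constraint.getD 1 0 ∈ order
instance (order : List Int) (constraint : List Int) : Decidable (Pre_possible5 order constraint) := by unfold Pre_possible5; infer_instance
def pvWitness_possible5 : List Int × List Int := ([1, 2, 3], [1, 2, 4])

def Spec_possible5 (order : List Int) (constraint : List Int) (out : List (List Int)) : Prop := out = possible5_alt order constraint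
instance (order : List Int) (constraint : List Int) (out : List (List Int)) : Decidable (Spec_possible5 order constraint out) := by unfold Spec_possible5; infer_instance

-- ===== CLAIM =====
def Claim_equal_possible5 : Prop := ∀ (order : List Int) (constraint : List Int), Dom_possible5 order constraint → Pre_possible5 order constraint → Spec_possible5 order constraint (possible5 order constraint)

-- ===== LEMMAS AND PROOFS =====

theorem foldl_append_singleton {α β : Type} (g : α → β) :
    ∀ (l : List α) (acc : List β),
      l.foldl (fun a i => a ++ [g i]) acc = acc ++ l.map g := by
  intro l
  induction l with
  | nil => intro acc; simp
  | cons x xs ih => intro acc; simp [List.foldl, ih]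

theorem altLoop_spec (c : Int) :
    ∀ (suf pre : List Int),
      wizAltLoop c pre suf =
        (List.range suf.length).map
          (fun t => pre ++ suf.take (t + 1) ++ c :: suf.drop (t + 1)) := by
  intro suf
  induction suf with
  | nil => intro pre; simp [wizAltLoop]
  | cons x s ih =>
    intro pre
    simp only [wizAltLoop, List.length_cons, List.range_succ_eq_map,
      List.map_cons, List.map_map, ih]
    refine congrArg₂ _ (by simp) ?_
    apply List.map_congr_left
    intro t _
    simp [List.take_succ_cons, List.drop_succ_cons]

-- ===== VERDICT =====
theorem possible5_spec : Claim_equal_possible5 := by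
  unfold Claim_equal_possible5
  intro order constraint _hdom hpre
  unfold Spec_possible5
  obtain ⟨hlen, hmem⟩ := hpre
  -- resolve the three constraint accesses
  have hl0 : 0 < constraint.length := by omega
  have hl1 : 1 < constraint.length := by omega
  have hl2 : 2 < constraint.length := by omega
  have h0 : PySem.List.pyGet? constraint 0 = some (constraint[0]'hl0) := by
    simpa using PySem.List.pyGet?_ofNat constraint 0 hl0
  have h1 : PySem.List.pyGet? constraint 1 = some (constraint[1]'hl1) := by
    simpa using PySem.List.pyGet?_ofNat constraint 1 hl1
  have h2 : PySem.List.pyGet? constraint 2 = some (constraint[2]'hl2) := by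
    simpa using PySem.List.pyGet?_ofNat constraint 2 hl2
  rw [List.getD_eq_getElem constraint 0 hl1] at hmem
  set b := constraint[1]'hl1 with hb
  set c := constraint[2]'hl2 with hc
  obtain ⟨k, hk⟩ : ∃ k, PySem.List.index? order b = some k := by
    have := PySem.List.index?_isSome_iff (xs := order) (v := b)
    rcases h : PySem.List.index? order b with _ | k
    · rw [h] at this; simp at this; exact absurd hmem this
    · exact ⟨k, rfl⟩
  have hklt : k < order.length := by
    obtain ⟨h, _⟩ := PySem.List.getElem_of_index?_eq_some hk
    exact h
  simp only [possible5, possible5_alt, h0, h1, h2, hk, Option.elim]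
  -- A side: foldl → map over range
  rw [foldl_append_singleton, PySem.List.pyRange_one]
  have hcnt : ((((order.length : Int) + 1) - ((k : Int) + 1))).toNat = order.length - k := by
    omega
  rw [hcnt]
  -- B side: slices → take/drop, loop → map
  have hcast : (k : Int) + 1 = ((k + 1 : Nat) : Int) := by push_cast; ring
  rw [hcast, PySem.List.slice_to_natCast, PySem.List.slice_from_natCast, altLoop_spec]
  have hlen' : (order.drop (k + 1)).length = order.length - (k + 1) := by
    simp
  rw [hlen', List.nil_append]
  -- both sides are maps over ranges; A's range has length (len - k) = (len-(k+1)) + 1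
  have hsz : order.length - k = (order.length - (k + 1)) + 1 := by omega
  rw [hsz, List.range_succ_eq_map, List.map_cons, List.map_map, List.map_cons]
  refine congrArg₂ _ ?_ ?_
  · -- heads: insert at k+1 vs take(k+1) ++ [c] ++ drop(k+1)
    rw [show ((k + 1 : Nat) : Int) + ((0 : Nat) : Int) = ((k + 1 : Nat) : Int) by push_cast; ring,
      PySem.List.insert_natCast order (k + 1) c (by omega)]
    simp
  · rw [List.map_map]
    apply List.map_congr_left
    intro t ht
    simp only [List.mem_range] at ht
    simp only [Function.comp, Nat.succ_eq_add_one]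
    rw [show ((k + 1 : Nat) : Int) + ((t + 1 : Nat) : Int) = ((k + t + 2 : Nat) : Int) by
        push_cast; ring,
      PySem.List.insert_natCast order (k + t + 2) c (by omega),
      List.drop_drop, ← List.take_add,
      show k + 1 + (t + 1) = k + t + 2 by omega]
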